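-- pv_equiv track=rewrite | github.com/prateeksingh1112/JunkBox | Movies/movi/views.py | page_list
-- ===== SOURCE A (Python) =====
-- def page_list(last_page , request_page):
--     n = 6
--     if (request_page + n) -1 <= last_page:
--         return [i for i in range(request_page , request_page+n)]
--
--     else:
--         while True:
--             if (request_page + n) <= last_page:
--                 return [i for i in range(request_page, request_page + n)]
--
--             else:
--                 n = n - 1
-- ===== SOURCE B (Python) =====
-- def page_list(last_page, request_page):
--     # Closed form: the while-loop in A always settles at n = last_page - request_page,
--     # yielding range(request_page, last_page) (empty when last_page <= request_page).
--     if request_page + 5 <= last_page: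
--         return list(range(request_page, request_page + 6))
--     return list(range(request_page, last_page))
-- ===== Notes on version B (the rewrite author's own statement) =====
-- stated objective: simpler
-- what changed: Replaced the decrementing while-loop search for the largest n with the closed form range(request_page, last_page), since the loop always settles at n = last_page - request_page.
import Mathlib
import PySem

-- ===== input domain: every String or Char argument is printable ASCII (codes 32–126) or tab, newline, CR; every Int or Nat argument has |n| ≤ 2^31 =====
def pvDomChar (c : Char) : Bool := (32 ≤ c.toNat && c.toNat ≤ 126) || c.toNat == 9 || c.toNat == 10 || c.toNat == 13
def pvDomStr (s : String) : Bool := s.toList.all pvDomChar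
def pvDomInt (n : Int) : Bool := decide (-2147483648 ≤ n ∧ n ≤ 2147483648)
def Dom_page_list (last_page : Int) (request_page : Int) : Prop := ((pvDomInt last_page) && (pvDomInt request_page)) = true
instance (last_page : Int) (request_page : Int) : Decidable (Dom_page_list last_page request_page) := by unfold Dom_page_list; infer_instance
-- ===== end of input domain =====

-- B replaces A's decrementing while-loop with its closed form range(request_page, last_page); same return value everywhere (simpler).


-- ===== PORT A =====
-- while-loop of A: decrement n until request_page + n <= last_page
def pageLoopA (last_page request_page n : Int) : List Int :=
  if request_page + n ≤ last_page then PySem.List.pyRange request_page (request_page + n) 1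
  else pageLoopA last_page request_page (n - 1)
termination_by (n - (last_page - request_page)).toNat
decreasing_by omega

def page_list (last_page : Int) (request_page : Int) : List Int :=
  if (request_page + 6) - 1 ≤ last_page then PySem.List.pyRange request_page (request_page + 6) 1
  else pageLoopA last_page request_page 6

-- ===== PORT B =====
def page_list_alt (last_page : Int) (request_page : Int) : List Int :=
  if request_page + 5 ≤ last_page then PySem.List.pyRange request_page (request_page + 6) 1
  else PySem.List.pyRange request_page last_page 1

-- ===== PRECONDITION & SPEC =====
def Spec_page_list (last_page : Int) (request_page : Int) (out : List Int) : Prop := out = page_list_alt last_page request_page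
instance (last_page : Int) (request_page : Int) (out : List Int) : Decidable (Spec_page_list last_page request_page out) := by unfold Spec_page_list; infer_instance

-- ===== CLAIM (what is proved, stated in full; the proofs are below) =====
def Claim_equal_page_list : Prop := ∀ (last_page : Int) (request_page : Int), Dom_page_list last_page request_page → Spec_page_list last_page request_page (page_list last_page request_page)

-- ===== LEMMAS AND PROOFS =====

-- ===== VERDICT (by name: the statement is the Claim_ definition above) =====
theorem pageLoopA_eq (last_page request_page : Int) :
    ∀ (k : Nat) (n : Int), (n - (last_page - request_page)).toNat = k →
      last_page - request_page ≤ n →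
      pageLoopA last_page request_page n = PySem.List.pyRange request_page last_page 1 := by
  intro k
  induction k with
  | zero =>
    intro n hk hle
    rw [pageLoopA]
    have : request_page + n ≤ last_page := by omega
    simp only [this, if_pos]
    have : request_page + n = last_page := by omega
    rw [this]
  | succ k ih =>
    intro n hk hle
    rw [pageLoopA]
    by_cases h : request_page + n ≤ last_page
    · simp only [h, if_pos]
      have hn : request_page + n = last_page := by omega
      rw [hn]
    · rw [if_neg h]
      exact ih (n - 1) (by omega) (by omega)

theorem page_list_spec : Claim_equal_page_list := by
  intro lp rp _
  unfold Spec_page_list page_list page_list_alt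
  by_cases h : rp + 5 ≤ lp
  · have h' : (rp + 6) - 1 ≤ lp := by omega
    simp [h, h']
  · have h' : ¬ ((rp + 6) - 1 ≤ lp) := by omega
    simp only [h, h', if_neg, not_false_iff]
    exact pageLoopA_eq lp rp _ 6 rfl (by omega)
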